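-- pv_equiv track=rewrite | github.com/paulklemstine/factor | pyth_quaternion.py | sigma_odd
-- ===== SOURCE A (Python) =====
-- from math import gcd, isqrt, log2
--
-- def sigma_odd(n):
--     """Sum of divisors of n that are not divisible by 4."""
--     # Remove factors of 4: sigma_odd(n) = sum_{d|n, 4 nmid d} d
--     s = 0
--     for d in range(1, isqrt(n) + 1):
--         if n % d == 0:
--             if d % 4 != 0:
--                 s += d
--             other = n // d
--             if other != d and other % 4 != 0:
--                 s += other
--     return s
-- ===== SOURCE B (Python) =====
-- from math import isqrt
--
-- def sigma_odd(n):
--     """Sum of divisors of n that are not divisible by 4."""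
--     # Inclusion-exclusion: divisors of n divisible by 4 are exactly 4*e for
--     # the divisors e of n//4 (when 4 | n), so sigma_odd(n) = sigma(n) - 4*sigma(n//4).
--     def sigma(m):
--         """Plain sum of all divisors of m."""
--         return sum(d + (m // d if m // d != d else 0)
--                    for d in range(1, isqrt(m) + 1) if m % d == 0)
--     if n % 4 == 0:
--         return sigma(n) - 4 * sigma(n // 4)
--     return sigma(n)
-- ===== Notes on version B (the rewrite author's own statement) =====
-- stated objective: alternative
-- what changed: Replaces the %4-filtered divisor-pairing loop with inclusion-exclusion sigma(n) - 4*sigma(n//4) (divisors divisible by 4 are 4*divisors of n//4), using a plain unfiltered divisor-sum comprehension as the helper.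
import Mathlib
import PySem

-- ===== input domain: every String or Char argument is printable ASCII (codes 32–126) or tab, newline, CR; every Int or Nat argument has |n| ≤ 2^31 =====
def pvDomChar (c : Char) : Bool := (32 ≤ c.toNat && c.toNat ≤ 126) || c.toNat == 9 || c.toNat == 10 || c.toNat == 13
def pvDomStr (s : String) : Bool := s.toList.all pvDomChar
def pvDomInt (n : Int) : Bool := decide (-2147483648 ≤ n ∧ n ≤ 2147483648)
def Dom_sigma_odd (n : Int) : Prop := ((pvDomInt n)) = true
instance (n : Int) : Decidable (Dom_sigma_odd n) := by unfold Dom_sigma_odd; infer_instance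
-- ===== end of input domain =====

-- B replaces A's %4-filtered divisor-pairing loop by inclusion-exclusion sigma(n) - 4*sigma(n//4) over a plain divisor-sum helper (alternative, not faster).

-- ===== PORT A =====
-- math.isqrt(n): exact for n ≥ 0 (the Pre_ domain); Python raises ValueError for n < 0, excluded by Pre_.
def pyIsqrt (n : Int) : Int := Int.ofNat (Nat.sqrt n.toNat)

def sigma_odd (n : Int) : Int :=
  (PySem.List.pyRange 1 (pyIsqrt n + 1) 1).foldl
    (fun s d =>
      if PySem.Int.mod n d = 0 then
        let s := if PySem.Int.mod d 4 ≠ 0 then s + d else s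
        let other := PySem.Int.floordiv n d
        if other ≠ d ∧ PySem.Int.mod other 4 ≠ 0 then s + other else s
      else s) 0

-- ===== PORT B =====
-- helper sigma(m): plain sum of all divisors of m (the comprehension in Source B)
def pySigma (m : Int) : Int :=
  (((PySem.List.pyRange 1 (pyIsqrt m + 1) 1).filter
      (fun d => PySem.Int.mod m d == 0)).map
     (fun d => d + (if PySem.Int.floordiv m d ≠ d then PySem.Int.floordiv m d else 0))).sum

def sigma_odd_alt (n : Int) : Int :=
  if PySem.Int.mod n 4 = 0 then pySigma n - 4 * pySigma (PySem.Int.floordiv n 4)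
  else pySigma n

-- ===== PRECONDITION & SPEC =====
-- Pre_ excludes n < 0, where A raises ValueError (math.isqrt of a negative argument).
def Pre_sigma_odd (n : Int) : Prop := 0 ≤ n
instance (n : Int) : Decidable (Pre_sigma_odd n) := by unfold Pre_sigma_odd; infer_instance
def pvWitness_sigma_odd : Int := 12

def Spec_sigma_odd (n : Int) (out : Int) : Prop := out = sigma_odd_alt n
instance (n : Int) (out : Int) : Decidable (Spec_sigma_odd n out) := by unfold Spec_sigma_odd; infer_instance

-- ===== CLAIM (what is proved, stated in full; the proofs are below) =====
def Claim_equal_sigma_odd : Prop := ∀ (n : Int), Dom_sigma_odd n → Pre_sigma_odd n → Spec_sigma_odd n (sigma_odd n)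

-- ===== LEMMAS AND PROOFS =====

-- pvH d = contribution of divisor d ("d if d % 4 ≠ 0 else 0"); pvGA/pvGB are the two loop bodies over ℕ
def pvH (d : ℕ) : ℤ := if d % 4 ≠ 0 then (d : ℤ) else 0
def pvGA (N d : ℕ) : ℤ := if d ∣ N then pvH d + (if N / d ≠ d then pvH (N / d) else 0) else 0
def pvGS (N d : ℕ) : ℤ := if d ∣ N then (d : ℤ) + (if N / d ≠ d then ((N / d : ℕ) : ℤ) else 0) else 0

lemma pv_sum_map_range (f : ℕ → ℤ) (n : ℕ) :
    ((List.range n).map f).sum = ∑ i ∈ Finset.range n, f i := by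
  induction n with
  | zero => simp
  | succ n ih => simp [List.range_succ, Finset.sum_range_succ, ih]

lemma pv_sum_filter_map (p : ℤ → Bool) (f : ℤ → ℤ) (l : List ℤ) :
    ((l.filter p).map f).sum = (l.map (fun x => if p x then f x else 0)).sum := by
  induction l with
  | nil => simp
  | cons a t ih => by_cases h : p a <;> simp [h, ih]

lemma pv_sum_range_shift (f : ℕ → ℤ) (m : ℕ) :
    ∑ i ∈ Finset.range m, f (1 + i) = ∑ d ∈ Finset.Icc 1 m, f d := by
  induction m with
  | zero => simp
  | succ m ih =>
      rw [Finset.sum_range_succ, Finset.sum_Icc_succ_top (by omega), ih, Nat.add_comm 1 m]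

lemma pv_mod4 (d : ℕ) : PySem.Int.mod (d : ℤ) 4 = 0 ↔ d % 4 = 0 := by
  rw [PySem.Int.mod_eq_zero_iff_dvd, show (4:ℤ) = ((4:ℕ):ℤ) from rfl,
    Int.natCast_dvd_natCast, Nat.dvd_iff_mod_eq_zero]

lemma pv_modN (N d : ℕ) : PySem.Int.mod (N : ℤ) (d : ℤ) = 0 ↔ d ∣ N := by
  rw [PySem.Int.mod_eq_zero_iff_dvd, Int.natCast_dvd_natCast]

lemma pv_castA (N d : ℕ) :
    (if PySem.Int.mod (N:ℤ) (d:ℤ) = 0 then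
        ((if PySem.Int.mod (d:ℤ) 4 ≠ 0 then (d:ℤ) else 0) +
         (if PySem.Int.floordiv (N:ℤ) (d:ℤ) ≠ (d:ℤ) ∧
              PySem.Int.mod (PySem.Int.floordiv (N:ℤ) (d:ℤ)) 4 ≠ 0 then
            PySem.Int.floordiv (N:ℤ) (d:ℤ) else 0))
      else 0) = pvGA N d := by
  have h3 : PySem.Int.floordiv (N:ℤ) (d:ℤ) = ((N / d : ℕ) : ℤ) := PySem.Int.floordiv_natCast N d
  simp only [h3, pv_modN, pv_mod4, Ne, Nat.cast_inj, pvGA, pvH]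
  split_ifs <;> first | rfl | omega

lemma pv_castS (N d : ℕ) :
    (if (PySem.Int.mod (N:ℤ) (d:ℤ) == 0) then
        ((d:ℤ) + (if PySem.Int.floordiv (N:ℤ) (d:ℤ) ≠ (d:ℤ) then
            PySem.Int.floordiv (N:ℤ) (d:ℤ) else 0))
      else 0) = pvGS N d := by
  have h3 : PySem.Int.floordiv (N:ℤ) (d:ℤ) = ((N / d : ℕ) : ℤ) := PySem.Int.floordiv_natCast N d
  simp only [h3, beq_iff_eq, pv_modN, Ne, Nat.cast_inj, pvGS]

lemma pv_A_eq (N : ℕ) : sigma_odd (N : ℤ) = ∑ d ∈ Finset.Icc 1 N.sqrt, pvGA N d := by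
  have hbody : (fun (s d : ℤ) =>
      if PySem.Int.mod (N:ℤ) d = 0 then
        let s' := if PySem.Int.mod d 4 ≠ 0 then s + d else s
        let other := PySem.Int.floordiv (N:ℤ) d
        if other ≠ d ∧ PySem.Int.mod other 4 ≠ 0 then s' + other else s'
      else s)
      = fun s d => s + (if PySem.Int.mod (N:ℤ) d = 0 then
          ((if PySem.Int.mod d 4 ≠ 0 then d else 0) +
           (if PySem.Int.floordiv (N:ℤ) d ≠ d ∧
                PySem.Int.mod (PySem.Int.floordiv (N:ℤ) d) 4 ≠ 0 then
              PySem.Int.floordiv (N:ℤ) d else 0))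
        else 0) := by
    funext s d
    simp only []
    split_ifs <;> ring
  have hiq : pyIsqrt (N : ℤ) = ((N.sqrt : ℕ) : ℤ) := by simp [pyIsqrt]
  rw [show sigma_odd (N:ℤ) = (PySem.List.pyRange 1 (pyIsqrt (N:ℤ) + 1) 1).foldl
      (fun s d => s + (if PySem.Int.mod (N:ℤ) d = 0 then
          ((if PySem.Int.mod d 4 ≠ 0 then d else 0) +
           (if PySem.Int.floordiv (N:ℤ) d ≠ d ∧
                PySem.Int.mod (PySem.Int.floordiv (N:ℤ) d) 4 ≠ 0 then
              PySem.Int.floordiv (N:ℤ) d else 0))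
        else 0)) 0 from by rw [sigma_odd, hbody]]
  rw [PySem.List.foldl_add, hiq, PySem.List.pyRange_one]
  rw [show ((N.sqrt : ℤ) + 1 - 1).toNat = N.sqrt by omega]
  rw [List.map_map, pv_sum_map_range, zero_add,
    ← pv_sum_range_shift (fun d => pvGA N d) N.sqrt]
  refine Finset.sum_congr rfl fun i _ => ?_
  have := pv_castA N (1 + i)
  simp only [Function.comp] at *
  push_cast at this ⊢
  exact this

lemma pv_S_eq (N : ℕ) : pySigma (N : ℤ) = ∑ d ∈ Finset.Icc 1 N.sqrt, pvGS N d := by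
  have hiq : pyIsqrt (N : ℤ) = ((N.sqrt : ℕ) : ℤ) := by simp [pyIsqrt]
  rw [pySigma, pv_sum_filter_map, hiq, PySem.List.pyRange_one]
  rw [show ((N.sqrt : ℤ) + 1 - 1).toNat = N.sqrt by omega]
  rw [List.map_map, pv_sum_map_range, ← pv_sum_range_shift (fun d => pvGS N d) N.sqrt]
  refine Finset.sum_congr rfl fun i _ => ?_
  have := pv_castS N (1 + i)
  simp only [Function.comp] at *
  push_cast at this ⊢
  exact this

-- the sqrt-pairing identity: summing h d and h (N/d) over divisors d ≤ √N
-- equals summing h over all divisors in [1, N]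
lemma pv_sqrt_pairing (N : ℕ) (h : ℕ → ℤ) :
    ∑ d ∈ (Finset.Icc 1 N.sqrt).filter (· ∣ N),
        (h d + if N / d ≠ d then h (N / d) else 0)
      = ∑ d ∈ (Finset.Icc 1 N).filter (· ∣ N), h d := by
  rcases Nat.eq_zero_or_pos N with hN | hN
  · subst hN; simp
  set r := N.sqrt with hr
  have hrr : r * r ≤ N := Nat.sqrt_le N
  have hlt : N < (r + 1) * (r + 1) := Nat.lt_succ_sqrt N
  rw [← Finset.sum_filter_add_sum_filter_not ((Finset.Icc 1 N).filter (· ∣ N)) (· ≤ r) h]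
  have hS : ((Finset.Icc 1 N).filter (· ∣ N)).filter (· ≤ r)
      = (Finset.Icc 1 r).filter (· ∣ N) := by
    ext d
    simp only [Finset.mem_filter, Finset.mem_Icc]
    constructor
    · rintro ⟨⟨⟨h1, _⟩, h3⟩, h4⟩; exact ⟨⟨h1, h4⟩, h3⟩
    · rintro ⟨⟨h1, h2⟩, h3⟩; exact ⟨⟨⟨h1, Nat.le_of_dvd hN h3⟩, h3⟩, h2⟩
  rw [hS, Finset.sum_add_distrib]
  congr 1
  rw [← Finset.sum_filter]
  refine Finset.sum_nbij' (i := fun d => N / d) (j := fun e => N / e) ?_ ?_ ?_ ?_ ?_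
  · -- small divisors with N/d ≠ d map into the large-divisor half
    intro d hd
    simp only [Finset.mem_filter, Finset.mem_Icc] at hd ⊢
    obtain ⟨⟨⟨h1, h2⟩, h3⟩, h4⟩ := hd
    have hmul : d * (N / d) = N := Nat.mul_div_cancel' h3
    have hq1 : 1 ≤ N / d := Nat.div_pos (Nat.le_of_dvd hN h3) (by omega)
    have hgt : ¬ N / d ≤ r := by
      intro hle
      rcases Nat.lt_or_ge (N / d) d with hc | hc
      · have : d * (N / d) < d * d := (Nat.mul_lt_mul_left (by omega : 0 < d)).mpr hc
        have : d * d ≤ r * r := Nat.mul_le_mul h2 h2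
        omega
      · have hc' : d < N / d := by omega
        have : d * (N / d) < (N / d) * (N / d) :=
          (Nat.mul_lt_mul_right (by omega : 0 < N / d)).mpr hc'
        have : (N / d) * (N / d) ≤ r * r := Nat.mul_le_mul hle hle
        omega
    exact ⟨⟨⟨hq1, Nat.div_le_self _ _⟩, Nat.div_dvd_of_dvd h3⟩, hgt⟩
  · -- large divisors map back into the small half, with N/(N/e) ≠ N/e
    intro e he
    simp only [Finset.mem_filter, Finset.mem_Icc, not_le] at he ⊢
    obtain ⟨⟨⟨h1, h2⟩, h3⟩, h4⟩ := he
    have hmul : e * (N / e) = N := Nat.mul_div_cancel' h3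
    have hq1 : 1 ≤ N / e := Nat.div_pos (Nat.le_of_dvd hN h3) (by omega)
    have hlt2 : N / e < e := by
      by_contra hc
      rw [not_lt] at hc
      have : e * e ≤ e * (N / e) := Nat.mul_le_mul_left e hc
      have : (r + 1) * (r + 1) ≤ e * e := Nat.mul_le_mul h4 h4
      omega
    have hle : N / e ≤ r := by
      rw [hr, Nat.le_sqrt]
      calc N / e * (N / e) ≤ N / e * e := Nat.mul_le_mul_left _ (by omega)
        _ = N := by rw [Nat.mul_comm]; exact hmul
    have hne : N / (N / e) ≠ N / e := by
      rw [Nat.div_div_self h3 (by omega)]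
      omega
    exact ⟨⟨⟨hq1, hle⟩, Nat.div_dvd_of_dvd h3⟩, hne⟩
  · intro d hd
    simp only [Finset.mem_filter, Finset.mem_Icc] at hd
    exact Nat.div_div_self hd.1.2 (by omega)
  · intro e he
    simp only [Finset.mem_filter, Finset.mem_Icc] at he
    exact Nat.div_div_self he.1.2 (by omega)
  · intro d hd
    rfl

-- pySigma computes the full divisor sum over [1, N]
lemma pv_sigma_sum (N : ℕ) :
    pySigma (N : ℤ) = ∑ d ∈ (Finset.Icc 1 N).filter (· ∣ N), (d : ℤ) := by
  rw [pv_S_eq]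
  simp only [pvGS]
  rw [← Finset.sum_filter]
  exact pv_sqrt_pairing N (fun d => (d : ℤ))

-- inclusion-exclusion: the divisors of N divisible by 4 are exactly 4*e for e ∣ N/4
lemma pv_incl (N : ℕ) (h4 : 4 ∣ N) :
    ∑ d ∈ (Finset.Icc 1 N).filter (· ∣ N), pvH d
      = (∑ d ∈ (Finset.Icc 1 N).filter (· ∣ N), (d : ℤ))
        - 4 * ∑ e ∈ (Finset.Icc 1 (N / 4)).filter (· ∣ (N / 4)), (e : ℤ) := by
  have hsplit : ∀ d : ℕ, pvH d = (d : ℤ) - (if 4 ∣ d then (d : ℤ) else 0) := by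
    intro d
    simp only [pvH, Ne]
    by_cases h : 4 ∣ d
    · simp [Nat.mod_eq_zero_of_dvd h, h]
    · have hm : d % 4 ≠ 0 := fun hc => h (Nat.dvd_of_mod_eq_zero hc)
      simp [h, hm]
  rw [Finset.sum_congr rfl (fun d _ => hsplit d), Finset.sum_sub_distrib]
  congr 1
  rw [← Finset.sum_filter, Finset.mul_sum]
  refine Finset.sum_nbij' (i := fun d => d / 4) (j := fun e => 4 * e) ?_ ?_ ?_ ?_ ?_
  · intro d hd
    simp only [Finset.mem_filter, Finset.mem_Icc] at hd ⊢
    obtain ⟨⟨⟨h1, h2⟩, h3⟩, hdd⟩ := hd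
    obtain ⟨k, hk⟩ := hdd
    obtain ⟨M, hM⟩ := h4
    have hq : d / 4 = k := by omega
    have hNq : N / 4 = M := by omega
    refine ⟨⟨by omega, Nat.div_le_div_right h2⟩, ?_⟩
    rw [hq, hNq]
    exact (Nat.mul_dvd_mul_iff_left (by norm_num : 0 < 4)).mp (by rw [← hk, ← hM]; exact h3)
  · intro e he
    simp only [Finset.mem_filter, Finset.mem_Icc] at he ⊢
    obtain ⟨⟨h1, h2⟩, h3⟩ := he
    have hN4 : 4 * (N / 4) = N := Nat.mul_div_cancel' h4
    refine ⟨⟨⟨by omega, by omega⟩, ?_⟩, ⟨e, rfl⟩⟩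
    rw [← hN4]
    exact Nat.mul_dvd_mul_left 4 h3
  · intro d hd
    simp only [Finset.mem_filter] at hd
    obtain ⟨k, hk⟩ := hd.2
    dsimp only
    omega
  · intro e _
    dsimp only
    omega
  · intro d hd
    simp only [Finset.mem_filter] at hd
    obtain ⟨k, hk⟩ := hd.2
    dsimp only
    subst hk
    rw [Nat.mul_div_cancel_left k (by norm_num : 0 < 4)]
    push_cast
    ring

-- ===== VERDICT =====
theorem sigma_odd_spec : Claim_equal_sigma_odd := by
  intro n _ hp
  unfold Pre_sigma_odd at hp
  obtain ⟨N, rfl⟩ : ∃ N : ℕ, n = (N : ℤ) := ⟨n.toNat, (Int.toNat_of_nonneg hp).symm⟩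
  unfold Spec_sigma_odd
  have hA : sigma_odd (N : ℤ) = ∑ d ∈ (Finset.Icc 1 N).filter (· ∣ N), pvH d := by
    rw [pv_A_eq]
    simp only [pvGA]
    rw [← Finset.sum_filter]
    exact pv_sqrt_pairing N pvH
  rw [hA]
  unfold sigma_odd_alt
  by_cases h4 : N % 4 = 0
  · rw [if_pos ((pv_mod4 N).mpr h4)]
    rw [show PySem.Int.floordiv (N:ℤ) 4 = ((N / 4 : ℕ) : ℤ) from PySem.Int.floordiv_natCast N 4]
    rw [pv_sigma_sum, pv_sigma_sum]
    exact pv_incl N (Nat.dvd_of_mod_eq_zero h4)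
  · rw [if_neg (fun hc => h4 ((pv_mod4 N).mp hc))]
    rw [pv_sigma_sum]
    refine Finset.sum_congr rfl fun d hd => ?_
    simp only [Finset.mem_filter] at hd
    have hnd : d % 4 ≠ 0 := by
      intro hc
      exact h4 (Nat.mod_eq_zero_of_dvd ((Nat.dvd_of_mod_eq_zero hc).trans hd.2))
    simp [pvH, hnd]
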